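-- pv_equiv track=rewrite | github.com/reynoldscem/aoc2022 | day_14/part1.py | all_points_along_path
-- ===== SOURCE A (Python) =====
-- def vector_subtract(first, second):
--     return (
--         first[0] - second[0],
--         first[1] - second[1]
--     )
--
-- def vector_add(first, second):
--     return (
--         first[0] + second[0],
--         first[1] + second[1]
--     )
--
-- def normalise(vector):
--     # Manhattan norm
--     norm = abs(sum(vector))
--
--     return (
--         vector[0] // norm,
--         vector[1] // norm
--     )
--
-- def all_points_along_path(source, dest):
--     difference = vector_subtract(dest, source)
--     norm = abs(sum(difference))
--     direction = normalise(difference)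
--
--     points = {source}
--     for _ in range(norm):
--         new_point = vector_add(source, direction)
--         points.add(new_point)
--         source = new_point
--
--     return points
-- ===== SOURCE B (Python) =====
-- def all_points_along_path(source, dest):
--     dx = dest[0] - source[0]
--     dy = dest[1] - source[1]
--     norm = abs(dx + dy)
--     direction = (dx // norm, dy // norm)
--     return {
--         (source[0] + i * direction[0], source[1] + i * direction[1])
--         for i in range(norm + 1)
--     }
-- ===== Notes on version B (the rewrite author's own statement) =====
-- stated objective: alternative
-- what changed: B inlines the vector helpers and replaces the running add-and-accumulate loop over a mutating source point by a closed-form set comprehension computing source + i*direction directly from the index i.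
import Mathlib
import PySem

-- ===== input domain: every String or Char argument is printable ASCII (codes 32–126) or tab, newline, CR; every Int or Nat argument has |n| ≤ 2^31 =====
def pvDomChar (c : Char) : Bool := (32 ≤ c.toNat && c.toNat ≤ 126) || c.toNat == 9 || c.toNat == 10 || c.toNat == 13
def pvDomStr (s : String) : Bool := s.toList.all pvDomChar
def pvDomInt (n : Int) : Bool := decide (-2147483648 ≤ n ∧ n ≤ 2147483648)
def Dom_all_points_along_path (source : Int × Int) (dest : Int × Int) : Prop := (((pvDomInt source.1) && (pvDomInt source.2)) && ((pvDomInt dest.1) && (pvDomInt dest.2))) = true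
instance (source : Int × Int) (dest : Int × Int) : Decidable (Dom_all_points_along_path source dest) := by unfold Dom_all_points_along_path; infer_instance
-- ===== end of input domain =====

-- B replaces A's accumulate-and-add loop by a closed-form offset per index (set comprehension);
-- objective: alternative decomposition (same asymptotic cost). Return value compared as a set.

-- ===== PORT A =====
def vector_subtract (first second : Int × Int) : Int × Int :=
  (first.1 - second.1, first.2 - second.2)

def vector_add (first second : Int × Int) : Int × Int :=
  (first.1 + second.1, first.2 + second.2)

def normalise (vector : Int × Int) : Int × Int :=
  let norm : Int := |vector.1 + vector.2|
  (PySem.Int.floordiv vector.1 norm, PySem.Int.floordiv vector.2 norm)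

def all_points_along_path (source : Int × Int) (dest : Int × Int) : List (Int × Int) :=
  let difference := vector_subtract dest source
  let norm : Int := |difference.1 + difference.2|
  let direction := normalise difference
  let res := (PySem.List.pyRange 0 norm 1).foldl
    (fun (st : PySem.Set (Int × Int) × (Int × Int)) _ =>
      let new_point := vector_add st.2 direction
      (PySem.Set.add st.1 new_point, new_point))
    (PySem.Set.ofList [source], source)
  res.1

-- ===== PORT B =====
def all_points_along_path_alt (source : Int × Int) (dest : Int × Int) : List (Int × Int) :=
  let dx := dest.1 - source.1
  let dy := dest.2 - source.2
  let norm : Int := |dx + dy|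
  let direction := (PySem.Int.floordiv dx norm, PySem.Int.floordiv dy norm)
  PySem.Set.ofList ((PySem.List.pyRange 0 (norm + 1) 1).map
    (fun i => (source.1 + i * direction.1, source.2 + i * direction.2)))

-- ===== PRECONDITION & SPEC =====
-- Pre_ excludes exactly the inputs where the Manhattan norm of dest - source is zero
-- (source = dest, or an anti-diagonal offset): there Python A raises ZeroDivisionError.
def Pre_all_points_along_path (source : Int × Int) (dest : Int × Int) : Prop :=
  (dest.1 - source.1) + (dest.2 - source.2) ≠ 0
instance (source : Int × Int) (dest : Int × Int) : Decidable (Pre_all_points_along_path source dest) := by unfold Pre_all_points_along_path; infer_instance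

def pvWitness_all_points_along_path : (Int × Int) × (Int × Int) := ((0, 0), (0, 3))

def Spec_all_points_along_path (source : Int × Int) (dest : Int × Int) (out : List (Int × Int)) : Prop := out = all_points_along_path_alt source dest
instance (source : Int × Int) (dest : Int × Int) (out : List (Int × Int)) : Decidable (Spec_all_points_along_path source dest out) := by unfold Spec_all_points_along_path; infer_instance

-- ===== CLAIM (what is proved, stated in full; the proofs are below) =====
def Claim_equal_all_points_along_path : Prop := ∀ (source : Int × Int) (dest : Int × Int), Dom_all_points_along_path source dest → Pre_all_points_along_path source dest → Spec_all_points_along_path source dest (all_points_along_path source dest)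

-- ===== LEMMAS AND PROOFS =====

-- the closed-form point at index j
def pvPt (s d : Int × Int) (j : Int) : Int × Int := (s.1 + j * d.1, s.2 + j * d.2)

def pvF (s d : Int × Int) (j : Nat) : Int × Int := pvPt s d (j : Int)

theorem pvOfList_append_singleton {α : Type} [BEq α] (xs : List α) (x : α) :
    PySem.Set.ofList (xs ++ [x]) = PySem.Set.add (PySem.Set.ofList xs) x := by
  simp [PySem.Set.ofList_eq_foldl, List.foldl_append]

theorem pvStep (s d : Int × Int) (k : Int) :
    vector_add (pvPt s d k) d = pvPt s d (k + 1) := by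
  simp only [vector_add, pvPt, Prod.mk.injEq]
  constructor <;> ring

theorem pvLoop {α : Type} (s d : Int × Int) (l : List α) : ∀ (k : Nat),
    l.foldl
      (fun (st : PySem.Set (Int × Int) × (Int × Int)) _ =>
        (PySem.Set.add st.1 (vector_add st.2 d), vector_add st.2 d))
      (PySem.Set.ofList ((List.range (k + 1)).map (pvF s d)), pvF s d k)
    = (PySem.Set.ofList ((List.range (k + 1 + l.length)).map (pvF s d)),
       pvF s d (k + l.length)) := by
  induction l with
  | nil => intro k; simp
  | cons x xs ih =>
    intro k
    have hstep : vector_add (pvF s d k) d = pvF s d (k + 1) := by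
      rw [show pvF s d (k + 1) = pvPt s d ((k : Int) + 1) from by simp only [pvF]; norm_cast]
      exact pvStep s d (k : Int)
    simp only [List.foldl_cons, hstep]
    have h1 : PySem.Set.add (PySem.Set.ofList ((List.range (k + 1)).map (pvF s d))) (pvF s d (k + 1))
        = PySem.Set.ofList ((List.range (k + 1 + 1)).map (pvF s d)) := by
      rw [List.range_succ (n := k + 1), List.map_append]
      simp only [List.map_cons, List.map_nil]
      rw [pvOfList_append_singleton]
    rw [h1, ih (k + 1)]
    have e1 : k + 1 + 1 + xs.length = k + 1 + (x :: xs).length := by simp; omega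
    have e2 : k + 1 + xs.length = k + (x :: xs).length := by simp; omega
    rw [e1, e2]

-- ===== VERDICT (by name: the statement is the Claim_ definition above) =====
theorem all_points_along_path_spec : Claim_equal_all_points_along_path := by
  intro source dest _ hpre
  unfold Spec_all_points_along_path all_points_along_path all_points_along_path_alt
  unfold Pre_all_points_along_path at hpre
  simp only [vector_subtract, normalise]
  set dx := dest.1 - source.1 with hdx
  set dy := dest.2 - source.2 with hdy
  set norm : Int := |dx + dy| with hnorm
  have hn : 0 < norm := by simp [hnorm]; omega
  set d : Int × Int := (PySem.Int.floordiv dx norm, PySem.Int.floordiv dy norm) with hd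
  rw [PySem.List.pyRange_one 0 norm, PySem.List.pyRange_one 0 (norm + 1)]
  have hinit : ((PySem.Set.ofList [source], source) : PySem.Set (Int × Int) × (Int × Int))
      = (PySem.Set.ofList ((List.range (0 + 1)).map (pvF source d)), pvF source d 0) := by
    simp [pvF, pvPt]
  rw [List.foldl_map, hinit, pvLoop source d _ 0]
  simp only [List.length_range, List.map_map]
  have hlen : 0 + 1 + (norm - 0).toNat = (norm + 1 - 0).toNat := by omega
  rw [hlen]
  congr 1
  ext j
  simp [pvF, pvPt, hd]
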